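-- pv_equiv track=rewrite | github.com/drewbrew/advent-of-code-2017 | day13.py | part_two
-- ===== SOURCE A (Python) =====
-- from itertools import count
--
-- def scanner(depth, time_index):
--     offset = time_index % ((depth - 1) * 2)
--
--     return 2 * (depth - 1) - offset if offset > depth - 1 else offset
--
-- def part_two(input_dict):
--     return next(
--         wait for wait in count()
--         if not any(
--             scanner(depth, wait + pos) == 0
--             for pos, depth in input_dict.items()
--         )
--     )
-- ===== SOURCE B (Python) =====
-- def part_two(input_dict):
--     # Segmented sieve: blocked waits form arithmetic progressions; mark them
--     # per-scanner in fixed-size chunks, then return the first unmarked wait.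
--     CHUNK = 64
--     # scanners with depth < 2 never catch the packet; depth >= 2 blocks waits
--     # w with (w + pos) % (2*(depth-1)) == 0
--     constraints = [((depth - 1) * 2, pos % ((depth - 1) * 2))
--                    for pos, depth in input_dict.items() if depth >= 2]
--     lo = 0
--     while True:
--         blocked = [False] * CHUNK
--         for period, r in constraints:
--             j = (-(lo + r)) % period
--             while j < CHUNK:
--                 blocked[j] = True
--                 j += period
--         try:
--             return lo + blocked.index(False)
--         except ValueError:
--             lo += CHUNK
-- ===== Notes on version B (the rewrite author's own statement) =====
-- stated objective: alternative
-- what changed: B inverts the traversal: instead of testing every scanner for each candidate wait, it marks each scanner's blocked waits as an arithmetic progression in a fixed-size segmented sieve chunk and returns the first unmarked wait; Pre_ excludes depth==1 entries (A raises ZeroDivisionError) and unsatisfiable scanner sets (A's count() search never returns).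
import Mathlib
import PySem

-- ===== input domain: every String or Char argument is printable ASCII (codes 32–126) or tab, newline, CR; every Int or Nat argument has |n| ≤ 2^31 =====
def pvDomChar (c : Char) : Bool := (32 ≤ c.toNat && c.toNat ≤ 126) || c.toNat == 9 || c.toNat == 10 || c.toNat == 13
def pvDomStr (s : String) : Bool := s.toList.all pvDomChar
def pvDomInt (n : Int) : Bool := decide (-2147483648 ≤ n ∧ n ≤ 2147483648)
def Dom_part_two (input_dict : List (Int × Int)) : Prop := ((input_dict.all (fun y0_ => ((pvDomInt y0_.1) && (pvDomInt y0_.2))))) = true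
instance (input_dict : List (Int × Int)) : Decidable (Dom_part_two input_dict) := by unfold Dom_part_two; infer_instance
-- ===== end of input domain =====

-- B replaces A's per-wait scanner simulation by a segmented sieve: blocked waits are marked
-- per-scanner as arithmetic progressions in fixed-size chunks, then the first unmarked wait
-- is returned (objective: alternative — per-constraint marking instead of per-wait testing).


-- Search bound (totality fuel for both ports): lcm of all scanner periods; any free wait
-- repeats modulo this bound, so the first free wait (if one exists) is below it.
def pvBound (input_dict : List (Int × Int)) : Nat :=
  input_dict.foldl (fun a pd => if 2 ≤ pd.2 then Nat.lcm a ((pd.2 - 1) * 2).toNat else a) 1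

-- ===== PORT A =====
def scannerP (depth time_index : Int) : Int :=
  let offset := PySem.Int.mod time_index ((depth - 1) * 2)
  if offset > depth - 1 then 2 * (depth - 1) - offset else offset

def partTwoGo (input_dict : List (Int × Int)) (wait : Int) : Nat → Int
  | 0 => wait
  | fuel + 1 =>
    if input_dict.any (fun pd => scannerP pd.2 (wait + pd.1) == 0) then
      partTwoGo input_dict (wait + 1) fuel
    else wait

def part_two (input_dict : List (Int × Int)) : Int :=
  partTwoGo input_dict 0 (pvBound input_dict)

-- ===== PORT B =====
def pvCHUNK : Nat := 64

-- the precomputed constraint table of Source B: (period, pos % period) per scanner of depth >= 2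
def mkConstraints (input_dict : List (Int × Int)) : List (Int × Int) :=
  input_dict.foldr
    (fun pd acc =>
      if 2 ≤ pd.2 then ((pd.2 - 1) * 2, PySem.Int.mod pd.1 ((pd.2 - 1) * 2)) :: acc else acc)
    []

-- Source B's inner `while j < CHUNK: blocked[j] = True; j += period` loop; j stays nonnegative
-- (it starts as a Python modulo by a positive period), so `j.toNat` is exact; fuel pvCHUNK
-- bounds the iteration count (the step is >= 1 on every call).
def markLoop : Nat → List Bool → Int → Int → List Bool
  | 0, buf, _, _ => buf
  | f + 1, buf, j, p =>
    if j < (pvCHUNK : Int) then markLoop f (buf.set j.toNat true) (j + p) p else buf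

-- Source B's `for period, r in constraints:` marking pass over one chunk
def markAll (cs : List (Int × Int)) (lo : Int) : List Bool :=
  cs.foldl
    (fun buf c => markLoop pvCHUNK buf (PySem.Int.mod (-(lo + c.2)) c.1) c.1)
    (List.replicate pvCHUNK false)

def altGo (cs : List (Int × Int)) (lo : Int) : Nat → Int
  | 0 => lo
  | f + 1 =>
    match PySem.List.index? (markAll cs lo) false with
    | some i => lo + (i : Int)
    | none => altGo cs (lo + (pvCHUNK : Int)) f

def part_two_alt (input_dict : List (Int × Int)) : Int :=
  altGo (mkConstraints input_dict) 0 (pvBound input_dict / pvCHUNK + 1)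

-- ===== PRECONDITION & SPEC =====
-- Pre_ excludes exactly: entries with depth = 1 (A raises ZeroDivisionError before it could
-- return), unsatisfiable constraint sets (A's count() search never returns — the bounded
-- existential is completeness of the search up to the lcm of the periods), and duplicate
-- positions (a Python dict collapses them, so the association-list form is ambiguous).
def Pre_part_two (input_dict : List (Int × Int)) : Prop :=
  (input_dict.map Prod.fst).Nodup ∧
  (∀ pd ∈ input_dict, pd.2 ≠ 1) ∧
  ∃ w ∈ List.range (pvBound input_dict),
    ∀ pd ∈ input_dict, 2 ≤ pd.2 → ((w : Int) + pd.1) % ((pd.2 - 1) * 2) ≠ 0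
instance (input_dict : List (Int × Int)) : Decidable (Pre_part_two input_dict) := by
  unfold Pre_part_two; infer_instance

def pvWitness_part_two : (List (Int × Int)) := [(0, 3), (1, 2)]

def Spec_part_two (input_dict : List (Int × Int)) (out : Int) : Prop := out = part_two_alt input_dict
instance (input_dict : List (Int × Int)) (out : Int) : Decidable (Spec_part_two input_dict out) := by unfold Spec_part_two; infer_instance

-- ===== CLAIM (what is proved, stated in full; the proofs are below) =====
def Claim_equal_part_two : Prop := ∀ (input_dict : List (Int × Int)), Dom_part_two input_dict → Pre_part_two input_dict → Spec_part_two input_dict (part_two input_dict)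

-- ===== LEMMAS AND PROOFS =====

-- A's blocking test for a wait, and B's (on the constraint table)
def BlkA (l : List (Int × Int)) (w : Int) : Bool :=
  l.any (fun pd => scannerP pd.2 (w + pd.1) == 0)
def BlkC (cs : List (Int × Int)) (w : Int) : Bool :=
  cs.any (fun c => PySem.Int.mod (w + c.2) c.1 == 0)

lemma mem_mkConstraints {l : List (Int × Int)} {c : Int × Int} (h : c ∈ mkConstraints l) :
    ∃ pd ∈ l, 2 ≤ pd.2 ∧ c = ((pd.2 - 1) * 2, PySem.Int.mod pd.1 ((pd.2 - 1) * 2)) := by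
  induction l with
  | nil => simp [mkConstraints] at h
  | cons pd tl ih =>
    by_cases hd : 2 ≤ pd.2
    · simp only [mkConstraints, List.foldr_cons, if_pos hd] at h
      rcases List.mem_cons.mp h with h1 | h2
      · exact ⟨pd, List.mem_cons_self, hd, h1⟩
      · obtain ⟨q, hq, hq2, hq3⟩ := ih h2
        exact ⟨q, List.mem_cons_of_mem _ hq, hq2, hq3⟩
    · simp only [mkConstraints, List.foldr_cons, if_neg hd] at h
      obtain ⟨q, hq, hq2, hq3⟩ := ih h
      exact ⟨q, List.mem_cons_of_mem _ hq, hq2, hq3⟩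

lemma mem_mkConstraints_of {l : List (Int × Int)} {pd : Int × Int} (hpd : pd ∈ l)
    (hd : 2 ≤ pd.2) :
    ((pd.2 - 1) * 2, PySem.Int.mod pd.1 ((pd.2 - 1) * 2)) ∈ mkConstraints l := by
  induction l with
  | nil => simp at hpd
  | cons q tl ih =>
    rcases List.mem_cons.mp hpd with rfl | hmem
    · simp only [mkConstraints, List.foldr_cons, if_pos hd]
      exact List.mem_cons_self
    · by_cases hq : 2 ≤ q.2
      · simp only [mkConstraints, List.foldr_cons, if_pos hq]
        exact List.mem_cons_of_mem _ (ih hmem)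
      · simp only [mkConstraints, List.foldr_cons, if_neg hq]
        exact ih hmem

lemma mkConstraints_period {l : List (Int × Int)} {c : Int × Int} (h : c ∈ mkConstraints l) :
    2 ≤ c.1 := by
  obtain ⟨pd, _, hd, rfl⟩ := mem_mkConstraints h
  simp only
  omega

lemma mod_resid (w p m : Int) (hm : 0 < m) :
    PySem.Int.mod (w + PySem.Int.mod p m) m = (w + p) % m := by
  rw [PySem.Int.mod_eq_emod_of_pos hm, PySem.Int.mod_eq_emod_of_pos hm, Int.add_emod,
    Int.emod_emod_of_dvd _ dvd_rfl, ← Int.add_emod]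

-- for depth >= 2 the scanner is at position 0 exactly when the wait hits the residue
lemma scanner_eq_zero (d p w : Int) (hd : 2 ≤ d) :
    (scannerP d (w + p) == 0) =
      (PySem.Int.mod (w + PySem.Int.mod p ((d - 1) * 2)) ((d - 1) * 2) == 0) := by
  have hm : (0 : Int) < (d - 1) * 2 := by omega
  rw [mod_resid _ _ _ hm]
  simp only [scannerP, PySem.Int.mod_eq_emod_of_pos hm]
  have h1 : (w + p) % ((d - 1) * 2) < (d - 1) * 2 := Int.emod_lt_of_pos _ (by omega)
  have h2 : (0 : Int) ≤ (w + p) % ((d - 1) * 2) := Int.emod_nonneg _ (by omega)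
  rw [Bool.eq_iff_iff]
  simp only [beq_iff_eq]
  split_ifs with hcase
  · constructor <;> intro hx <;> omega
  · constructor <;> intro hx <;> omega

lemma blk_eq (l : List (Int × Int)) (h : ∀ pd ∈ l, pd.2 ≠ 1) (w : Int) :
    BlkA l w = BlkC (mkConstraints l) w := by
  induction l with
  | nil => simp [BlkA, BlkC, mkConstraints]
  | cons pd tl ih =>
    have htl : ∀ q ∈ tl, q.2 ≠ 1 := fun q hq => h q (List.mem_cons_of_mem _ hq)
    by_cases hd : 2 ≤ pd.2
    · have hmk : mkConstraints (pd :: tl)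
          = ((pd.2 - 1) * 2, PySem.Int.mod pd.1 ((pd.2 - 1) * 2)) :: mkConstraints tl := by
        simp [mkConstraints, hd]
      have hA : BlkA (pd :: tl) w = ((scannerP pd.2 (w + pd.1) == 0) || BlkA tl w) := by
        simp [BlkA]
      rw [hA, hmk]
      have hC : BlkC (((pd.2 - 1) * 2, PySem.Int.mod pd.1 ((pd.2 - 1) * 2)) :: mkConstraints tl) w
          = ((PySem.Int.mod (w + PySem.Int.mod pd.1 ((pd.2 - 1) * 2)) ((pd.2 - 1) * 2) == 0)
              || BlkC (mkConstraints tl) w) := by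
        simp [BlkC]
      rw [hC, scanner_eq_zero _ _ _ hd, ih htl]
    · have hne : pd.2 ≠ 1 := h pd List.mem_cons_self
      have hzero : (scannerP pd.2 (w + pd.1) == 0) = false := by
        have hm' : (0 : Int) < -((pd.2 - 1) * 2) := by omega
        have hrw : PySem.Int.mod (w + pd.1) ((pd.2 - 1) * 2)
            = -PySem.Int.mod (-(w + pd.1)) (-((pd.2 - 1) * 2)) := by
          rw [← PySem.Int.mod_neg_neg, neg_neg, neg_neg]
        have h1 : PySem.Int.mod (-(w + pd.1)) (-((pd.2 - 1) * 2)) < -((pd.2 - 1) * 2) := by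
          rw [PySem.Int.mod_eq_emod_of_pos hm']; exact Int.emod_lt_of_pos _ hm'
        have h2 : (0 : Int) ≤ PySem.Int.mod (-(w + pd.1)) (-((pd.2 - 1) * 2)) := by
          rw [PySem.Int.mod_eq_emod_of_pos hm']; exact Int.emod_nonneg _ (by omega)
        simp only [scannerP, hrw, Bool.eq_false_iff, ne_eq, beq_iff_eq]
        split_ifs with hcase
        · omega
        · omega
      have hmk : mkConstraints (pd :: tl) = mkConstraints tl := by
        simp [mkConstraints, hd]
      rw [hmk, ← ih htl]
      simp [BlkA, hzero]

lemma markLoop_length (f : Nat) (buf : List Bool) (j p : Int) :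
    (markLoop f buf j p).length = buf.length := by
  induction f generalizing buf j with
  | zero => rfl
  | succ f ih =>
    simp only [markLoop]
    split_ifs with hj
    · rw [ih, List.length_set]
    · rfl

lemma getD_set (l : List Bool) (n : Nat) (a : Bool) (i : Nat) (hi : i < l.length) :
    (l.set n a).getD i false = if n = i then a else l.getD i false := by
  simp only [List.getD_eq_getElem?_getD, List.getElem?_set]
  by_cases h1 : n = i
  · subst h1
    simp [hi]
  · simp [h1]

lemma markLoop_getD (f : Nat) (buf : List Bool) (j p : Int) (hp : 1 ≤ p) (hj : 0 ≤ j)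
    (hlen : buf.length = pvCHUNK) (hf : (pvCHUNK : Int) ≤ j + p * f)
    (i : Nat) (hi : i < pvCHUNK) :
    (markLoop f buf j p).getD i false
      = (buf.getD i false || decide (j ≤ (i : Int) ∧ p ∣ ((i : Int) - j))) := by
  induction f generalizing buf j with
  | zero =>
    have hcond : ¬ (j ≤ (i : Int) ∧ p ∣ ((i : Int) - j)) := by
      rintro ⟨hle, -⟩
      simp only [Nat.cast_zero, mul_zero, add_zero] at hf
      omega
    simp [markLoop, hcond]
  | succ f ih =>
    simp only [markLoop]
    split_ifs with hjc
    · have hlen' : (buf.set j.toNat true).length = pvCHUNK := by simp [hlen]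
      have hf' : (pvCHUNK : Int) ≤ (j + p) + p * (f : Int) := by
        have he : j + p * (((f : Nat) : Int) + 1) = (j + p) + p * (f : Int) := by ring
        push_cast at hf
        linarith
      rw [ih (buf.set j.toNat true) (j + p) (by omega) hlen' hf']
      rw [getD_set _ _ _ _ (by omega : i < buf.length)]
      by_cases hij : j.toNat = i
      · rw [if_pos hij]
        have hji : (i : Int) = j := by omega
        have hcond : j ≤ (i : Int) ∧ p ∣ ((i : Int) - j) := by
          refine ⟨by omega, ?_⟩
          rw [hji, sub_self]
          exact dvd_zero p
        simp [hcond]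
      · rw [if_neg hij]
        have hijZ : (i : Int) ≠ j := by omega
        congr 1
        rw [decide_eq_decide]
        constructor
        · rintro ⟨hle, hdvd⟩
          refine ⟨by omega, ?_⟩
          have he : ((i : Int) - j) = ((i : Int) - (j + p)) + p := by ring
          rw [he]
          exact dvd_add hdvd dvd_rfl
        · rintro ⟨hle, hdvd⟩
          have hpos : 0 < (i : Int) - j := by omega
          have hge : p ≤ (i : Int) - j := Int.le_of_dvd hpos hdvd
          refine ⟨by omega, ?_⟩
          have he : ((i : Int) - (j + p)) = ((i : Int) - j) - p := by ring
          rw [he]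
          exact dvd_sub hdvd dvd_rfl
    · have hcond : ¬ (j ≤ (i : Int) ∧ p ∣ ((i : Int) - j)) := by
        rintro ⟨hle, -⟩
        omega
      simp [hcond]

lemma markFold_getD (cs : List (Int × Int)) (hcs : ∀ c ∈ cs, 2 ≤ c.1) (lo : Int) :
    ∀ (buf : List Bool), buf.length = pvCHUNK → ∀ i : Nat, i < pvCHUNK →
      (cs.foldl (fun buf c => markLoop pvCHUNK buf (PySem.Int.mod (-(lo + c.2)) c.1) c.1)
          buf).getD i false
        = (buf.getD i false || BlkC cs (lo + i)) := by
  induction cs with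
  | nil => intro buf _ i _; simp [BlkC]
  | cons c tl ih =>
    intro buf hlen i hi
    have hp : 2 ≤ c.1 := hcs c List.mem_cons_self
    have hppos : (0 : Int) < c.1 := by omega
    have hj0b : 0 ≤ PySem.Int.mod (-(lo + c.2)) c.1 ∧ PySem.Int.mod (-(lo + c.2)) c.1 < c.1 := by
      rw [PySem.Int.mod_eq_emod_of_pos hppos]
      exact ⟨Int.emod_nonneg _ (by omega), Int.emod_lt_of_pos _ hppos⟩
    have hfuel : (pvCHUNK : Int) ≤ PySem.Int.mod (-(lo + c.2)) c.1 + c.1 * (pvCHUNK : Nat) := by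
      have h1 : (1 : Int) * (pvCHUNK : Int) ≤ c.1 * (pvCHUNK : Int) :=
        mul_le_mul_of_nonneg_right (by omega) (by positivity)
      push_cast
      push_cast at h1
      linarith [hj0b.1]
    simp only [List.foldl_cons]
    rw [ih (fun q hq => hcs q (List.mem_cons_of_mem _ hq)) _
      (by rw [markLoop_length]; exact hlen) i hi]
    rw [markLoop_getD pvCHUNK buf _ c.1 (by omega) hj0b.1 hlen hfuel i hi]
    have hdv : c.1 ∣ (lo + c.2 + PySem.Int.mod (-(lo + c.2)) c.1) := by
      have h0 : c.1 ∣ (-(lo + c.2) - PySem.Int.mod (-(lo + c.2)) c.1) := by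
        rw [PySem.Int.mod_eq_emod_of_pos hppos]
        have he0 : (-(lo + c.2) - (-(lo + c.2)) % c.1) = c.1 * ((-(lo + c.2)) / c.1) := by
          rw [Int.emod_def]; ring
        rw [he0]
        exact dvd_mul_right _ _
      have he : (lo + c.2 + PySem.Int.mod (-(lo + c.2)) c.1)
          = -(-(lo + c.2) - PySem.Int.mod (-(lo + c.2)) c.1) := by ring
      rw [he]
      exact dvd_neg.mpr h0
    have hdec : decide (PySem.Int.mod (-(lo + c.2)) c.1 ≤ (i : Int)
          ∧ c.1 ∣ ((i : Int) - PySem.Int.mod (-(lo + c.2)) c.1))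
        = (PySem.Int.mod ((lo + (i : Int)) + c.2) c.1 == 0) := by
      rw [Bool.eq_iff_iff]
      simp only [decide_eq_true_eq, beq_iff_eq, PySem.Int.mod_eq_zero_iff_dvd]
      constructor
      · rintro ⟨hle, hdvd⟩
        have he : (lo + (i : Int) + c.2)
            = ((i : Int) - PySem.Int.mod (-(lo + c.2)) c.1)
              + (lo + c.2 + PySem.Int.mod (-(lo + c.2)) c.1) := by ring
        rw [he]
        exact dvd_add hdvd hdv
      · intro hdvd
        have hd2 : c.1 ∣ ((i : Int) - PySem.Int.mod (-(lo + c.2)) c.1) := by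
          have he : ((i : Int) - PySem.Int.mod (-(lo + c.2)) c.1)
              = (lo + (i : Int) + c.2) - (lo + c.2 + PySem.Int.mod (-(lo + c.2)) c.1) := by ring
          rw [he]
          exact dvd_sub hdvd hdv
        refine ⟨?_, hd2⟩
        by_contra hlt
        push_neg at hlt
        have hpos : 0 < PySem.Int.mod (-(lo + c.2)) c.1 - (i : Int) := by omega
        have hd3 : c.1 ∣ (PySem.Int.mod (-(lo + c.2)) c.1 - (i : Int)) := by
          have hneg : c.1 ∣ -((i : Int) - PySem.Int.mod (-(lo + c.2)) c.1) := dvd_neg.mpr hd2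
          rwa [neg_sub] at hneg
        have := Int.le_of_dvd hpos hd3
        omega
    rw [hdec]
    have hCcons : BlkC (c :: tl) (lo + (i : Int))
        = ((PySem.Int.mod ((lo + (i : Int)) + c.2) c.1 == 0) || BlkC tl (lo + (i : Int))) := by
      simp [BlkC]
    rw [hCcons]
    rw [Bool.or_assoc]

lemma markFold_length (cs : List (Int × Int)) (lo : Int) :
    ∀ (buf : List Bool),
      (cs.foldl (fun buf c => markLoop pvCHUNK buf (PySem.Int.mod (-(lo + c.2)) c.1) c.1)
          buf).length = buf.length := by
  induction cs with
  | nil => intro buf; rfl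
  | cons c tl ih =>
    intro buf
    simp only [List.foldl_cons]
    rw [ih, markLoop_length]

lemma markAll_length (cs : List (Int × Int)) (lo : Int) :
    (markAll cs lo).length = pvCHUNK := by
  unfold markAll
  rw [markFold_length, List.length_replicate]

lemma markAll_getD (cs : List (Int × Int)) (hcs : ∀ c ∈ cs, 2 ≤ c.1) (lo : Int)
    (i : Nat) (hi : i < pvCHUNK) :
    (markAll cs lo).getD i false = BlkC cs (lo + i) := by
  unfold markAll
  rw [markFold_getD cs hcs lo _ (List.length_replicate) i hi]
  simp [List.getD_eq_getElem?_getD, List.getElem?_replicate, hi]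

lemma goA_spec (l : List (Int × Int)) :
    ∀ (fuel : Nat) (w : Int), (∃ k : Nat, k < fuel ∧ BlkA l (w + k) = false) →
      ∃ k : Nat, partTwoGo l w fuel = w + k ∧ BlkA l (w + k) = false ∧
        ∀ j : Nat, j < k → BlkA l (w + j) = true := by
  intro fuel
  induction fuel with
  | zero =>
    rintro w ⟨k, hk, -⟩
    omega
  | succ f ih =>
    rintro w ⟨k, hk, hfree⟩
    by_cases hb : BlkA l w = true
    · have hk0 : k ≠ 0 := by
        intro h0
        subst h0
        simp only [Nat.cast_zero, add_zero] at hfree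
        rw [hfree] at hb
        exact Bool.false_ne_true hb
      have hfree' : BlkA l ((w + 1) + ((k - 1 : Nat) : Int)) = false := by
        have he : ((w + 1) + ((k - 1 : Nat) : Int)) = w + (k : Int) := by
          push_cast
          omega
        rw [he]
        exact hfree
      obtain ⟨k2, he2, hf2, hmin2⟩ := ih (w + 1) ⟨k - 1, by omega, hfree'⟩
      refine ⟨k2 + 1, ?_, ?_, ?_⟩
      · have hb' : (l.any (fun pd => scannerP pd.2 (w + pd.1) == 0)) = true := hb
        simp only [partTwoGo, hb', if_pos]
        rw [he2]
        push_cast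
        ring
      · have he : w + ((k2 + 1 : Nat) : Int) = (w + 1) + (k2 : Int) := by push_cast; ring
        rw [he]
        exact hf2
      · intro j hj
        rcases Nat.eq_zero_or_pos j with rfl | hjpos
        · simpa using hb
        · have he : w + (j : Int) = (w + 1) + ((j - 1 : Nat) : Int) := by push_cast; omega
          rw [he]
          exact hmin2 (j - 1) (by omega)
    · refine ⟨0, ?_, ?_, ?_⟩
      · have hb' : (l.any (fun pd => scannerP pd.2 (w + pd.1) == 0)) = false :=
          Bool.not_eq_true _ ▸ (by simpa [BlkA] using hb)
        simp [partTwoGo, hb']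
      · simpa using (Bool.not_eq_true (BlkA l w) ▸ (by simpa [BlkA] using hb) : BlkA l w = false)
      · intro j hj
        omega

lemma goB_spec (cs : List (Int × Int)) (hcs : ∀ c ∈ cs, 2 ≤ c.1) :
    ∀ (f : Nat) (lo : Int), (∃ k : Nat, k < f * pvCHUNK ∧ BlkC cs (lo + k) = false) →
      ∃ k : Nat, altGo cs lo f = lo + k ∧ BlkC cs (lo + k) = false ∧
        ∀ j : Nat, j < k → BlkC cs (lo + j) = true := by
  intro f
  induction f with
  | zero =>
    rintro lo ⟨k, hk, -⟩
    omega
  | succ f ih =>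
    rintro lo ⟨k, hk, hfree⟩
    cases hidx : PySem.List.index? (markAll cs lo) false with
    | some i =>
      obtain ⟨hilen, hval, hbefore⟩ := PySem.List.getElem_of_index?_eq_some hidx
      have hiC : i < pvCHUNK := by rw [markAll_length] at hilen; exact hilen
      refine ⟨i, ?_, ?_, ?_⟩
      · simp only [altGo]
        rw [hidx]
      · rw [← markAll_getD cs hcs lo i hiC]
        rw [List.getD_eq_getElem?_getD, List.getElem?_eq_getElem hilen, hval]
        rfl
      · intro j hj
        have hjlen : j < (markAll cs lo).length := by omega
        have hjC : j < pvCHUNK := by rw [markAll_length] at hjlen; exact hjlen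
        have hne := hbefore j hj
        rw [← markAll_getD cs hcs lo j hjC]
        rw [List.getD_eq_getElem?_getD, List.getElem?_eq_getElem hjlen]
        cases hcase : (markAll cs lo)[j] with
        | false => exact absurd hcase hne
        | true => rfl
    | none =>
      have hall : ∀ j : Nat, j < pvCHUNK → BlkC cs (lo + j) = true := by
        intro j hjC
        have hnm : false ∉ markAll cs lo := (PySem.List.index?_eq_none_iff _ _).mp hidx
        have hjlen : j < (markAll cs lo).length := by rw [markAll_length]; exact hjC
        rw [← markAll_getD cs hcs lo j hjC, List.getD_eq_getElem?_getD,
          List.getElem?_eq_getElem hjlen]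
        cases hcase : (markAll cs lo)[j] with
        | false => exact absurd (hcase ▸ List.getElem_mem hjlen) hnm
        | true => rfl
      have hkge : pvCHUNK ≤ k := by
        by_contra hlt
        push_neg at hlt
        rw [hall k hlt] at hfree
        exact absurd hfree (by simp)
      have hfree' : BlkC cs ((lo + (pvCHUNK : Int)) + ((k - pvCHUNK : Nat) : Int)) = false := by
        have he : (lo + (pvCHUNK : Int)) + ((k - pvCHUNK : Nat) : Int) = lo + (k : Int) := by
          push_cast
          omega
        rw [he]
        exact hfree
      obtain ⟨k2, he2, hf2, hmin2⟩ := ih (lo + (pvCHUNK : Int))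
        ⟨k - pvCHUNK, by simp only [Nat.succ_mul] at hk; omega, hfree'⟩
      refine ⟨pvCHUNK + k2, ?_, ?_, ?_⟩
      · simp only [altGo]
        rw [hidx, he2]
        push_cast
        ring
      · have he : lo + ((pvCHUNK + k2 : Nat) : Int) = (lo + (pvCHUNK : Int)) + (k2 : Int) := by
          push_cast; ring
        rw [he]
        exact hf2
      · intro j hj
        by_cases hjC : j < pvCHUNK
        · exact hall j hjC
        · have he : lo + (j : Int) = (lo + (pvCHUNK : Int)) + ((j - pvCHUNK : Nat) : Int) := by
            push_cast; omega
          rw [he]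
          exact hmin2 (j - pvCHUNK) (by omega)

lemma blkC_false_iff (l : List (Int × Int)) (w : Int) :
    BlkC (mkConstraints l) w = false ↔
      ∀ pd ∈ l, 2 ≤ pd.2 → (w + pd.1) % ((pd.2 - 1) * 2) ≠ 0 := by
  unfold BlkC
  rw [List.any_eq_false]
  constructor
  · intro hall pd hpd hd
    have hc := hall _ (mem_mkConstraints_of hpd hd)
    simp only [beq_iff_eq, Bool.not_eq_true] at hc
    rw [mod_resid _ _ _ (by omega : (0:Int) < (pd.2 - 1) * 2)] at hc
    simpa using hc
  · intro hall c hc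
    obtain ⟨pd, hpd, hd, rfl⟩ := mem_mkConstraints hc
    simp only [beq_iff_eq]
    rw [mod_resid _ _ _ (by omega : (0:Int) < (pd.2 - 1) * 2)]
    simpa using hall pd hpd hd

-- ===== VERDICT (by name: the statement is the Claim_ definition above) =====
theorem part_two_spec : Claim_equal_part_two := by
  intro l _ hpre
  obtain ⟨-, h1, w0, hw0mem, hw0⟩ := hpre
  have hw0lt : w0 < pvBound l := List.mem_range.mp hw0mem
  have hfreeC : BlkC (mkConstraints l) ((0 : Int) + (w0 : Int)) = false := by
    rw [zero_add]
    exact (blkC_false_iff l _).mpr hw0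
  have hAB : ∀ w : Int, BlkA l w = BlkC (mkConstraints l) w := blk_eq l h1
  have hfreeA : BlkA l ((0 : Int) + (w0 : Int)) = false := by rw [hAB]; exact hfreeC
  obtain ⟨kA, heA, hfA, hminA⟩ := goA_spec l (pvBound l) 0 ⟨w0, hw0lt, hfreeA⟩
  have hcs : ∀ c ∈ mkConstraints l, 2 ≤ c.1 := fun c hc => mkConstraints_period hc
  have hC64 : pvCHUNK = 64 := rfl
  obtain ⟨kB, heB, hfB, hminB⟩ := goB_spec (mkConstraints l) hcs (pvBound l / pvCHUNK + 1) 0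
    ⟨w0, by rw [hC64] at *; omega, hfreeC⟩
  have hk : kA = kB := by
    by_contra hne
    rcases Nat.lt_or_ge kA kB with hlt | hge
    · have hblk := hminB kA hlt
      rw [← hAB] at hblk
      rw [hblk] at hfA
      exact absurd hfA (by simp)
    · have hge' : kB < kA := by omega
      have hblk := hminA kB hge'
      rw [hAB] at hblk
      rw [hblk] at hfB
      exact absurd hfB (by simp)
  unfold Spec_part_two part_two part_two_alt
  rw [heA, heB, hk]
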